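-- pv_equiv track=rewrite | github.com/m13v/social-autoposter | scripts/fazm_theme_flip/cleanup_residuals.py | _scan_simple_string
-- ===== SOURCE A (Python) =====
-- def _scan_simple_string(text: str, start: int, quote: str) -> int:
--     n = len(text)
--     i = start + 1
--     while i < n:
--         c = text[i]
--         if c == '\\' and i + 1 < n:
--             i += 2
--         elif c == quote:
--             return i + 1
--         elif c == '\n':
--             return i
--         else:
--             i += 1
--     return n
-- ===== SOURCE B (Python) =====
-- def _scan_simple_string(text: str, start: int, quote: str) -> int:
--     # Two staged passes over the scanned region: pass 1 materialises the
--     # characters and an explicit escape mask (esc[j] = position j is consumed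
--     # by a backslash escape); pass 2 searches the mask for the first
--     # unescaped terminator.
--     n = len(text)
--     chars = [text[i] for i in range(start + 1, n)]
--     k = len(chars)
--     esc = [False] * (k + 1)
--     for j in range(k):
--         esc[j + 1] = (not esc[j]) and chars[j] == '\\' and j + 1 < k
--     for j in range(k):
--         if esc[j]:
--             continue
--         c = chars[j]
--         i = start + 1 + j
--         if c == '\\' and j + 1 < k:
--             continue
--         if c == quote:
--             return i + 1
--         if c == '\n':
--             return i
--     return n
-- ===== Notes on version B (the rewrite author's own statement) =====
-- stated objective: alternative
-- what changed: Replaces A's single destructive while-loop that jumps the index two places past a backslash escape with two staged passes: pass 1 materialises the scanned characters and an explicit boolean escape-mask array, pass 2 searches the mask for the first unescaped quote/newline terminator.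
import Mathlib
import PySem

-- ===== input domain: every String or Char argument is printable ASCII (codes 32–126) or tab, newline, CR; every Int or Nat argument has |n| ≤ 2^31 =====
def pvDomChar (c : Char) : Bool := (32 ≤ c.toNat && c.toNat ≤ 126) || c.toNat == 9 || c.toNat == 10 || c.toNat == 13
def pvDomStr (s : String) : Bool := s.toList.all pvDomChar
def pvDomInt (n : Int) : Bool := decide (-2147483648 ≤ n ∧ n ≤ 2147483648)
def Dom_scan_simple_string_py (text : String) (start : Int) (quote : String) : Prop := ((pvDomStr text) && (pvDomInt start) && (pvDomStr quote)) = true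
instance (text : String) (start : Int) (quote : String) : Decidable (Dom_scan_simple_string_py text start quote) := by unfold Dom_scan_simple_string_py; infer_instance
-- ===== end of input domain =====

-- B replaces A's single destructive while-loop (index jumping by two past an escape) by two
-- staged passes: pass 1 materialises the scanned characters and an explicit escape mask,
-- pass 2 searches the mask for the first unescaped terminator (objective: alternative, same O(n)).

-- ===== PORT A =====
-- A's while loop: i jumps by 2 past an escape, by 1 otherwise; returns on quote/newline.
def scanAWhile (text quote : String) (n i : Int) : Int :=
  if _h : i < n then
    match PySem.Str.pyGet? text i with
    | none => 0          -- Python raises IndexError here; excluded by Pre_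
    | some c =>
      if c = '\\' ∧ i + 1 < n then scanAWhile text quote n (i + 2)
      else if String.ofList [c] = quote then i + 1
      else if c = '\n' then i
      else scanAWhile text quote n (i + 1)
  else n
termination_by (n - i).toNat
decreasing_by all_goals (simp_wf; omega)

def scan_simple_string_py (text : String) (start : Int) (quote : String) : Int :=
  scanAWhile text quote (PySem.Str.len text) (start + 1)

-- ===== PORT B =====
-- pass-1a: chars = [text[i] for i in range(start+1, n)]
-- (Str.pyGet? none = IndexError, excluded by Pre_; the default char is never used inside Pre_)
def pvCharsB (text : String) (start : Int) : List Char :=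
  (PySem.List.pyRange (start + 1) (PySem.Str.len text) 1).map
    (fun i => (PySem.Str.pyGet? text i).getD ' ')

-- pass-1b: the escape mask esc[0..k-1]: esc[j+1] = (not esc[j]) and chars[j]=='\\' and j+1<k
-- (built in order, as Python's fill loop does; the unused final cell esc[k] is not produced)
def pvEscB : Bool → List Char → List Bool
  | _, [] => []
  | e, c :: rest => e :: pvEscB (!e && (c == '\\') && !rest.isEmpty) rest

-- pass 2: first unescaped terminator; i carries start+1+j, cs ≠ [] ⇔ j+1 < k
def pvPass2 (quote : String) (n : Int) : List Char → List Bool → Int → Int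
  | [], _, _ => n
  | _ :: _, [], _ => n   -- unreachable: the mask has the same length as chars
  | c :: cs, e :: es, i =>
    if e then pvPass2 quote n cs es (i + 1)
    else if c = '\\' ∧ cs ≠ [] then pvPass2 quote n cs es (i + 1)
    else if String.ofList [c] = quote then i + 1
    else if c = '\n' then i
    else pvPass2 quote n cs es (i + 1)

def scan_simple_string_py_alt (text : String) (start : Int) (quote : String) : Int :=
  let chars := pvCharsB text start
  pvPass2 quote (PySem.Str.len text) chars (pvEscB false chars) (start + 1)

-- ===== PRECONDITION & SPEC =====
-- Pre_ excludes exactly the inputs where Python A raises IndexError: start+1 < -len(text),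
-- where the first subscript text[start+1] is below the negative-index range.
def Pre_scan_simple_string_py (text : String) (start : Int) (quote : String) : Prop :=
  -(PySem.Str.len text) ≤ start + 1

instance (text : String) (start : Int) (quote : String) : Decidable (Pre_scan_simple_string_py text start quote) := by unfold Pre_scan_simple_string_py; infer_instance

def pvWitness_scan_simple_string_py : String × Int × String := ("ab\\nc'd", 0, "'")

def Spec_scan_simple_string_py (text : String) (start : Int) (quote : String) (out : Int) : Prop := out = scan_simple_string_py_alt text start quote
instance (text : String) (start : Int) (quote : String) (out : Int) : Decidable (Spec_scan_simple_string_py text start quote out) := by unfold Spec_scan_simple_string_py; infer_instance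

-- ===== CLAIM =====
def Claim_equal_scan_simple_string_py : Prop := ∀ (text : String) (start : Int) (quote : String), Dom_scan_simple_string_py text start quote → Pre_scan_simple_string_py text start quote → Spec_scan_simple_string_py text start quote (scan_simple_string_py text start quote)

-- ===== LEMMAS AND PROOFS =====

-- Str.pyGet? returns a character at every in-range index (used for both loops).
lemma pyGet?_some_of_inrange (text : String) (i : Int)
    (h1 : -(PySem.Str.len text) ≤ i) (h2 : i < PySem.Str.len text) :
    ∃ c, PySem.Str.pyGet? text i = some c := by
  rcases h : PySem.Str.pyGet? text i with _ | c
  · exfalso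
    have hn := (PySem.List.pyGet?_eq_none_iff (xs := text.toList) (i := i)).mp h
    have he : text.toList.length = text.length := by simp
    have hlen := PySem.Str.len_eq text
    simp [PySem.Raise.InRange] at hn
    omega
  · exact ⟨c, rfl⟩

-- the char list B materialises from index i on
def pvCharsFrom (text : String) (i : Int) : List Char :=
  (PySem.List.pyRange i (PySem.Str.len text) 1).map
    (fun j => (PySem.Str.pyGet? text j).getD ' ')

lemma pvCharsFrom_nil (text : String) (i : Int) (h : PySem.Str.len text ≤ i) :
    pvCharsFrom text i = [] := by
  unfold pvCharsFrom; rw [PySem.List.pyRange_one_eq_nil h]; rfl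

lemma pvCharsFrom_cons (text : String) (i : Int) (c : Char)
    (hi : i < PySem.Str.len text) (hc : PySem.Str.pyGet? text i = some c) :
    pvCharsFrom text i = c :: pvCharsFrom text (i + 1) := by
  unfold pvCharsFrom
  rw [PySem.List.pyRange_one_cons hi]
  have hc' : PySem.List.pyGet? text.toList i = some c := hc
  simp [hc']

-- Main correspondence: A's while loop from index i equals B's pass 2 over the chars
-- and escape mask materialised from i on (escape flag clear at entry).
lemma scan_loop_eq (text quote : String) :
    ∀ (k : Nat) (i : Int), ((PySem.Str.len text) - i).toNat ≤ k →
      -(PySem.Str.len text) ≤ i →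
      scanAWhile text quote (PySem.Str.len text) i
        = pvPass2 quote (PySem.Str.len text) (pvCharsFrom text i)
            (pvEscB false (pvCharsFrom text i)) i := by
  intro k
  induction k with
  | zero =>
    intro i hk _
    rw [scanAWhile, dif_neg (by omega), pvCharsFrom_nil text i (by omega), pvEscB, pvPass2]
  | succ k ih =>
    intro i hk hlo
    set n := PySem.Str.len text with hn
    by_cases hi : i < n
    · obtain ⟨c, hc⟩ := pyGet?_some_of_inrange text i hlo hi
      rw [pvCharsFrom_cons text i c hi hc, scanAWhile, pvEscB, pvPass2]
      simp only [dif_pos hi, hc, Bool.false_eq_true, if_false]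
      by_cases hb : c = '\\'
      · subst hb
        by_cases h2 : i + 1 < n
        · -- A skips two; B's mask marks i+1 escaped, pass 2 steps over it
          obtain ⟨c', hc'⟩ := pyGet?_some_of_inrange text (i + 1) (by omega) h2
          have hne : pvCharsFrom text (i + 1) ≠ [] := by
            rw [pvCharsFrom_cons text (i + 1) c' h2 hc']; simp
          rw [if_pos (show ('\\' = '\\' ∧ i + 1 < n) from ⟨rfl, h2⟩),
              if_pos (show ('\\' = '\\' ∧ pvCharsFrom text (i + 1) ≠ []) from ⟨rfl, hne⟩),
              pvCharsFrom_cons text (i + 1) c' h2 hc']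
          simp only [List.isEmpty_cons, Bool.not_false, Bool.true_and, beq_self_eq_true, pvEscB,
            pvPass2, if_true, Bool.not_true, Bool.false_and]
          rw [show i + 1 + 1 = i + 2 from by ring]
          exact ih (i + 2) (by omega) (by omega)
        · -- backslash at the last character: chars from i+1 is empty
          have hnil : pvCharsFrom text (i + 1) = [] := pvCharsFrom_nil text (i + 1) (by omega)
          rw [hnil,
              if_neg (show ¬('\\' = '\\' ∧ i + 1 < n) from fun h => h2 h.2),
              if_neg (show ¬('\\' = '\\' ∧ ([] : List Char) ≠ []) from fun h => h.2 rfl)]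
          by_cases hq : String.ofList ['\\'] = quote
          · rw [if_pos hq, if_pos hq]
          · rw [if_neg hq, if_neg hq,
                if_neg (show ¬('\\' = '\n') from by decide),
                if_neg (show ¬('\\' = '\n') from by decide)]
            simp only [pvPass2]
            rw [scanAWhile, dif_neg (by omega)]
      · rw [if_neg (show ¬(c = '\\' ∧ i + 1 < n) from fun h => hb h.1),
            if_neg (show ¬(c = '\\' ∧ pvCharsFrom text (i + 1) ≠ []) from fun h => hb h.1)]
        by_cases hq : String.ofList [c] = quote
        · rw [if_pos hq, if_pos hq]
        · rw [if_neg hq, if_neg hq]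
          by_cases hnl : c = '\n'
          · rw [if_pos hnl, if_pos hnl]
          · rw [if_neg hnl, if_neg hnl]
            have hflag : (!false && (c == '\\') && !(pvCharsFrom text (i + 1)).isEmpty) = false := by
              simp [hb]
            rw [hflag]
            exact ih (i + 1) (by omega) (by omega)
    · rw [scanAWhile, dif_neg hi, pvCharsFrom_nil text i (by omega), pvEscB, pvPass2]

-- ===== VERDICT =====
theorem scan_simple_string_py_spec : Claim_equal_scan_simple_string_py := by
  intro text start quote _hdom hpre
  unfold Pre_scan_simple_string_py at hpre
  unfold Spec_scan_simple_string_py scan_simple_string_py scan_simple_string_py_alt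
  show scanAWhile text quote (PySem.Str.len text) (start + 1)
      = pvPass2 quote (PySem.Str.len text) (pvCharsB text start)
          (pvEscB false (pvCharsB text start)) (start + 1)
  have : pvCharsB text start = pvCharsFrom text (start + 1) := rfl
  rw [this]
  exact scan_loop_eq text quote ((PySem.Str.len text) - (start + 1)).toNat (start + 1) le_rfl hpre
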